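-- pv_equiv track=rewrite | github.com/thzthix/Algorithm | 백준/Silver/24447. 알고리즘 수업 － 너비 우선 탐색 4/알고리즘 수업 － 너비 우선 탐색 4.py | BFS
-- ===== SOURCE A (Python) =====
-- from collections import deque
--
-- def BFS(start_node, graph):
--     queue = deque([(start_node,0)])
--     visited = set([start_node])
--     curr_order = 1
--     result = 0
--     while queue:
--         curr_node, depth = queue.popleft()
--         for i in sorted(graph[curr_node]):
--             if i not in visited:
--                 child_depth = depth+1
--                 curr_order +=1
--                 queue.append((i,child_depth))
--                 visited.add(i)
--                 result += child_depth * curr_order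
--
--     return result
-- ===== SOURCE B (Python) =====
-- def BFS(start_node, graph):
--     # Level-synchronized BFS: frontier lists instead of a deque of (node, depth)
--     # pairs, recording discovery order; the weighted sum is a separate second pass.
--     visited = {start_node}
--     order = [(start_node, 0)]
--     frontier = [start_node]
--     depth = 0
--     while frontier:
--         depth += 1
--         nxt = []
--         for node in frontier:
--             for nb in sorted(graph[node]):
--                 if nb not in visited:
--                     visited.add(nb)
--                     nxt.append(nb)
--                     order.append((nb, depth))
--         frontier = nxt
--     return sum(i * d for i, (_, d) in enumerate(order, 1))
-- ===== Notes on version B (the rewrite author's own statement) =====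
-- stated objective: alternative
-- what changed: B replaces the deque of (node, depth) pairs with inline weighted accumulation by a level-synchronized BFS over plain frontier lists that records the discovery order, computing the weighted sum depth*index in a separate second enumerate pass.
import Mathlib
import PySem

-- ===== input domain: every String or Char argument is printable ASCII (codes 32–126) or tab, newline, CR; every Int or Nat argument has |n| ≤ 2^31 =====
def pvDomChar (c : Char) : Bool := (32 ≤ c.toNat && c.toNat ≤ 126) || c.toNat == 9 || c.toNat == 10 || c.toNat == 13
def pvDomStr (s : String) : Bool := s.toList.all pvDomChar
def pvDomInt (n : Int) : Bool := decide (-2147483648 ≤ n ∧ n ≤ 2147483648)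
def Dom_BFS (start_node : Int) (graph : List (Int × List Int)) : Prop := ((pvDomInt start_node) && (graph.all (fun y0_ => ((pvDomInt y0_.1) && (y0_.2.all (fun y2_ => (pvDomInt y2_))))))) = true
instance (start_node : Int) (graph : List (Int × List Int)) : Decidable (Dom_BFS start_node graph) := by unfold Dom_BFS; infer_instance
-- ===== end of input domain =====

-- B is a level-synchronized BFS (frontier lists, no deque, no per-entry depth pairs) that
-- records discovery order and computes the weighted sum in a separate second pass;
-- same return value as A, no speed claim.

-- ===== PORT A =====
-- helpers for the termination measure of the BFS loops (both ports):
-- pvAV graph = all nodes occurring in adjacency lists; pvU graph v = how many of them are unvisited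
def pvAV (graph : List (Int × List Int)) : List Int :=
  PySem.Set.ofList (graph.flatMap (fun p => p.2))

def pvU (graph : List (Int × List Int)) (v : List Int) : Nat :=
  ((pvAV graph).filter (fun n => decide (n ∉ v))).length

lemma pvU_add_lt (graph : List (Int × List Int)) (v : List Int) (i : Int)
    (hAV : i ∈ pvAV graph) (hv : i ∉ v) :
    pvU graph (PySem.Set.add v i) < pvU graph v := by
  rw [PySem.Set.add_of_not_mem hv]
  unfold pvU
  have hcong :
      (pvAV graph).filter (fun n => decide (n ∉ v ++ [i]))
        = ((pvAV graph).filter (fun n => decide (n ∉ v))).filter (fun n => !(n == i)) := by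
    rw [List.filter_filter]
    apply List.filter_congr
    intro x _
    by_cases hx : x ∈ v <;> by_cases hxi : x = i <;> simp [hx, hxi]
  rw [hcong, List.length_filter_lt_length_iff_exists]
  exact ⟨i, by simp [hAV, hv]⟩

-- every value looked up in the (Python-dict view of) graph is an adjacency value of graph
lemma pv_mem_items_update {κ ν : Type} [BEq κ] [LawfulBEq κ]
    (l : List (κ × ν)) (d : PySem.Dict κ ν) (p : κ × ν)
    (h : p ∈ (d.update l).items) : p ∈ d.items ∨ p ∈ l := by
  induction l using List.reverseRecOn generalizing d with
  | nil => exact Or.inl h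
  | append_singleton l q ih =>
    have hupd : d.update (l ++ [q]) = (d.update l).insert q.1 q.2 := by
      simp [PySem.Dict.update]
    rw [hupd] at h
    rcases (PySem.Dict.mem_items_insert _ _ _ _).1 h with h1 | h2
    · right; simp [h1]
    · rcases ih d h2.1 with h3 | h3
      · exact Or.inl h3
      · right; simp [h3]

lemma pv_adj_subset_AV (graph : List (Int × List Int)) (k x : Int)
    (hx : x ∈ PySem.Dict.getD (PySem.Dict.ofList graph) k []) : x ∈ pvAV graph := by
  rcases hget : (PySem.Dict.ofList graph).get? k with _ | adj
  · rw [PySem.Dict.getD_eq_get?_getD, hget] at hx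
    simp at hx
  · rw [PySem.Dict.getD_eq_get?_getD, hget] at hx
    simp at hx
    have hmem : (k, adj) ∈ (PySem.Dict.ofList graph).items :=
      PySem.Dict.mem_items_of_get?_eq_some _ hget
    have : (k, adj) ∈ graph := by
      rcases pv_mem_items_update graph PySem.Dict.empty (k, adj) hmem with h | h
      · simp [PySem.Dict.empty] at h
      · exact h
    unfold pvAV
    rw [PySem.Set.mem_ofList, List.mem_flatMap]
    exact ⟨(k, adj), this, hx⟩

-- the body of A's inner 'for i in sorted(graph[curr_node])' loop; state = (queue, visited, curr_order, result)
def aInner (depth : Int) (st : List (Int × Int) × List Int × Int × Int) (i : Int) :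
    List (Int × Int) × List Int × Int × Int :=
  if PySem.Set.contains st.2.1 i then st
  else (st.1 ++ [(i, depth + 1)], PySem.Set.add st.2.1 i, st.2.2.1 + 1,
        st.2.2.2 + (depth + 1) * (st.2.2.1 + 1))

lemma foldA_measure (graph : List (Int × List Int)) (d : Int) :
    ∀ (xs : List Int) (st : List (Int × Int) × List Int × Int × Int),
      (∀ x ∈ xs, x ∈ pvAV graph) →
      2 * pvU graph (xs.foldl (aInner d) st).2.1 + (xs.foldl (aInner d) st).1.length
        ≤ 2 * pvU graph st.2.1 + st.1.length := by
  intro xs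
  induction xs with
  | nil => intro st _; simp
  | cons i xs ih =>
    intro st hm
    rw [List.foldl_cons]
    refine le_trans (ih _ (fun x hx => hm x (List.mem_cons_of_mem _ hx))) ?_
    by_cases hc : i ∈ st.2.1
    · simp [aInner, hc]
    · have hlt := pvU_add_lt graph st.2.1 i (hm i (List.mem_cons_self)) hc
      rw [PySem.Set.add_of_not_mem hc] at hlt
      simp [aInner, hc]
      omega

-- A's while loop over the deque of (node, depth) pairs
def aLoop (graph : List (Int × List Int)) : List (Int × Int) → List Int → Int → Int → Int
  | [], _, _, res => res
  | (curr, depth) :: rest, visited, ord, res =>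
    aLoop graph
      ((PySem.List.sorted (PySem.Dict.getD (PySem.Dict.ofList graph) curr []) (fun x => x) false).foldl
        (aInner depth) (rest, visited, ord, res)).1
      ((PySem.List.sorted (PySem.Dict.getD (PySem.Dict.ofList graph) curr []) (fun x => x) false).foldl
        (aInner depth) (rest, visited, ord, res)).2.1
      ((PySem.List.sorted (PySem.Dict.getD (PySem.Dict.ofList graph) curr []) (fun x => x) false).foldl
        (aInner depth) (rest, visited, ord, res)).2.2.1
      ((PySem.List.sorted (PySem.Dict.getD (PySem.Dict.ofList graph) curr []) (fun x => x) false).foldl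
        (aInner depth) (rest, visited, ord, res)).2.2.2
  termination_by queue visited _ _ => 2 * pvU graph visited + queue.length
  decreasing_by
    have := foldA_measure graph depth
      (PySem.List.sorted (PySem.Dict.getD (PySem.Dict.ofList graph) curr []) (fun x => x) false)
      (rest, visited, ord, res)
      (fun x hx => pv_adj_subset_AV graph curr x ((PySem.List.mem_sorted _ _ _ _).1 hx))
    simp only [List.length_cons]
    simp at this
    omega

def BFS (start_node : Int) (graph : List (Int × List Int)) : Int :=
  aLoop graph [(start_node, 0)] (PySem.Set.ofList [start_node]) 1 0

-- ===== PORT B =====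
-- body of B's inner 'for nb in sorted(graph[node])' loop; state = (visited, nxt, order)
def bInner (d : Int) (st : List Int × List Int × List (Int × Int)) (nb : Int) :
    List Int × List Int × List (Int × Int) :=
  if PySem.Set.contains st.1 nb then st
  else (PySem.Set.add st.1 nb, st.2.1 ++ [nb], st.2.2 ++ [(nb, d)])

-- body of B's 'for node in frontier' loop
def bNode (graph : List (Int × List Int)) (d : Int) (st : List Int × List Int × List (Int × Int))
    (node : Int) : List Int × List Int × List (Int × Int) :=
  (PySem.List.sorted (PySem.Dict.getD (PySem.Dict.ofList graph) node []) (fun x => x) false).foldl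
    (bInner d) st

lemma foldBInner_measure (graph : List (Int × List Int)) (d : Int) :
    ∀ (xs : List Int) (st : List Int × List Int × List (Int × Int)),
      (∀ x ∈ xs, x ∈ pvAV graph) →
      2 * pvU graph (xs.foldl (bInner d) st).1 + (xs.foldl (bInner d) st).2.1.length
        ≤ 2 * pvU graph st.1 + st.2.1.length := by
  intro xs
  induction xs with
  | nil => intro st _; simp
  | cons i xs ih =>
    intro st hm
    rw [List.foldl_cons]
    refine le_trans (ih _ (fun x hx => hm x (List.mem_cons_of_mem _ hx))) ?_
    by_cases hc : i ∈ st.1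
    · simp [bInner, hc]
    · have hlt := pvU_add_lt graph st.1 i (hm i (List.mem_cons_self)) hc
      rw [PySem.Set.add_of_not_mem hc] at hlt
      simp [bInner, hc]
      omega

lemma foldBNode_measure (graph : List (Int × List Int)) (d : Int) :
    ∀ (ns : List Int) (st : List Int × List Int × List (Int × Int)),
      2 * pvU graph (ns.foldl (bNode graph d) st).1 + (ns.foldl (bNode graph d) st).2.1.length
        ≤ 2 * pvU graph st.1 + st.2.1.length := by
  intro ns
  induction ns with
  | nil => intro st; simp
  | cons n ns ih =>
    intro st
    rw [List.foldl_cons]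
    refine le_trans (ih _) ?_
    exact foldBInner_measure graph d _ st
      (fun x hx => pv_adj_subset_AV graph n x ((PySem.List.mem_sorted _ _ _ _).1 hx))

-- B's 'while frontier' loop, one recursive call per level
def bLevel (graph : List (Int × List Int)) :
    List Int → List Int → List (Int × Int) → Int → List (Int × Int)
  | [], _, order, _ => order
  | f :: fs, visited, order, depth =>
    bLevel graph
      ((f :: fs).foldl (bNode graph (depth + 1)) (visited, [], order)).2.1
      ((f :: fs).foldl (bNode graph (depth + 1)) (visited, [], order)).1
      ((f :: fs).foldl (bNode graph (depth + 1)) (visited, [], order)).2.2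
      (depth + 1)
  termination_by frontier visited _ _ => 2 * pvU graph visited + frontier.length
  decreasing_by
    have := foldBNode_measure graph (depth + 1) (f :: fs) (visited, [], order)
    simp only [List.length_cons, List.length_nil] at *
    omega

-- B's second pass: sum(i * d for i, (_, d) in enumerate(order, 1))
def pvWsum (order : List (Int × Int)) : Int :=
  ((PySem.List.enumerate order 1).map (fun p => p.1 * p.2.2)).sum

def BFS_alt (start_node : Int) (graph : List (Int × List Int)) : Int :=
  pvWsum (bLevel graph [start_node] (PySem.Set.ofList [start_node]) [(start_node, 0)] 0)

-- ===== PRECONDITION & SPEC =====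
-- Pre_BFS is exactly the condition under which the Python A returns: every node reachable from
-- start_node through graph's keys (a |graph|-step closure suffices) is itself a key of graph;
-- on any other input A (and B) raise KeyError at the first missing node dequeued.
def pvReach (start_node : Int) (graph : List (Int × List Int)) : List Int :=
  (List.range graph.length).foldl
    (fun S _ => PySem.Set.update S
      (S.flatMap (fun k => PySem.Dict.getD (PySem.Dict.ofList graph) k [])))
    (PySem.Set.ofList [start_node])

def Pre_BFS (start_node : Int) (graph : List (Int × List Int)) : Prop :=
  ∀ x ∈ pvReach start_node graph, x ∈ graph.map (fun p => p.1)
instance (start_node : Int) (graph : List (Int × List Int)) : Decidable (Pre_BFS start_node graph) := by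
  unfold Pre_BFS; infer_instance

def pvWitness_BFS : Int × (List (Int × List Int)) := (0, [(0, [1]), (1, [0])])

def Spec_BFS (start_node : Int) (graph : List (Int × List Int)) (out : Int) : Prop := out = BFS_alt start_node graph
instance (start_node : Int) (graph : List (Int × List Int)) (out : Int) : Decidable (Spec_BFS start_node graph out) := by unfold Spec_BFS; infer_instance

-- ===== CLAIM (what is proved, stated in full; the proofs are below) =====
def Claim_equal_BFS : Prop := ∀ (start_node : Int) (graph : List (Int × List Int)), Dom_BFS start_node graph → Pre_BFS start_node graph → Spec_BFS start_node graph (BFS start_node graph)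

-- ===== LEMMAS AND PROOFS =====

-- the common discovery core of both inner loops: (final visited, newly discovered in order)
def disc (v : List Int) : List Int → List Int × List Int
  | [] => (v, [])
  | i :: xs =>
    if PySem.Set.contains v i then disc v xs
    else ((disc (PySem.Set.add v i) xs).1, i :: (disc (PySem.Set.add v i) xs).2)

lemma disc_sub (graph : List (Int × List Int)) :
    ∀ (xs v : List Int), (∀ x ∈ xs, x ∈ pvAV graph) →
      pvU graph (disc v xs).1 + (disc v xs).2.length ≤ pvU graph v := by
  intro xs
  induction xs with
  | nil => intro v _; simp [disc]
  | cons i xs ih =>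
    intro v hm
    by_cases hc : i ∈ v
    · simpa [disc, hc] using ih v (fun x hx => hm x (List.mem_cons_of_mem _ hx))
    · have hlt := pvU_add_lt graph v i (hm i (List.mem_cons_self)) hc
      have hih := ih (PySem.Set.add v i) (fun x hx => hm x (List.mem_cons_of_mem _ hx))
      rw [PySem.Set.add_of_not_mem hc] at hlt hih
      simp [disc, hc]
      omega

lemma pvWsum_append_singleton (order : List (Int × Int)) (n dd : Int) :
    pvWsum (order ++ [(n, dd)]) = pvWsum order + dd * ((order.length : Int) + 1) := by
  unfold pvWsum
  rw [PySem.List.enumerate_append, List.map_append, List.sum_append]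
  simp [PySem.List.enumerate_cons, mul_comm, add_comm]

lemma foldA_char (d : Int) :
    ∀ (xs : List Int) (q : List (Int × Int)) (v : List Int) (order : List (Int × Int)),
      xs.foldl (aInner d) (q, v, (order.length : Int), pvWsum order)
        = (q ++ (disc v xs).2.map (fun n => (n, d + 1)), (disc v xs).1,
           (((order ++ (disc v xs).2.map (fun n => (n, d + 1))).length : Int)),
           pvWsum (order ++ (disc v xs).2.map (fun n => (n, d + 1)))) := by
  intro xs
  induction xs with
  | nil => intro q v order; simp [disc]
  | cons i xs ih =>
    intro q v order
    rw [List.foldl_cons]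
    by_cases hc : i ∈ v
    · simpa [aInner, disc, hc] using ih q v order
    · have h1 : ((order ++ [(i, d + 1)]).length : Int) = (order.length : Int) + 1 := by simp
      have h2 := pvWsum_append_singleton order i (d + 1)
      have hih := ih (q ++ [(i, d + 1)]) (PySem.Set.add v i) (order ++ [(i, d + 1)])
      rw [h1, h2] at hih
      simpa [aInner, disc, hc, List.append_assoc] using hih

lemma foldB_char (d : Int) :
    ∀ (xs v nxt : List Int) (order : List (Int × Int)),
      xs.foldl (bInner d) (v, nxt, order)
        = ((disc v xs).1, nxt ++ (disc v xs).2, order ++ (disc v xs).2.map (fun n => (n, d))) := by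
  intro xs
  induction xs with
  | nil => intro v nxt order; simp [disc]
  | cons i xs ih =>
    intro v nxt order
    rw [List.foldl_cons]
    by_cases hc : i ∈ v
    · simpa [bInner, disc, hc] using ih v nxt order
    · simpa [bInner, disc, hc, List.append_assoc] using
        ih (PySem.Set.add v i) (nxt ++ [i]) (order ++ [(i, d)])

lemma pv_main (graph : List (Int × List Int)) :
    ∀ (N : Nat) (lvl nxt v : List Int) (order : List (Int × Int)) (d : Int),
      4 * pvU graph v + 2 * lvl.length + 3 * nxt.length ≤ N →
      aLoop graph (lvl.map (fun n => (n, d)) ++ nxt.map (fun n => (n, d + 1))) v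
          ((order.length : Int)) (pvWsum order)
        = pvWsum (bLevel graph
            ((lvl.foldl (bNode graph (d + 1)) (v, nxt, order)).2.1)
            ((lvl.foldl (bNode graph (d + 1)) (v, nxt, order)).1)
            ((lvl.foldl (bNode graph (d + 1)) (v, nxt, order)).2.2) (d + 1)) := by
  intro N
  induction N with
  | zero =>
    intro lvl nxt v order d h
    cases lvl with
    | cons x ls => simp [List.length_cons] at h
    | nil =>
      cases nxt with
      | cons y ys => simp [List.length_cons] at h
      | nil => simp [aLoop, bLevel]
  | succ N ih =>
    intro lvl nxt v order d h
    cases lvl with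
    | nil =>
      cases nxt with
      | nil => simp [aLoop, bLevel]
      | cons y ys =>
        have hm : 4 * pvU graph v + 2 * (y :: ys).length + 3 * ([] : List Int).length ≤ N := by
          simp only [List.length_cons, List.length_nil] at h ⊢
          omega
        have hih := ih (y :: ys) [] v order (d + 1) hm
        simp only [List.map_nil, List.nil_append, List.append_nil, List.foldl_nil] at hih ⊢
        rw [hih]
        conv_rhs => rw [bLevel]
    | cons x ls =>
      have hsub := disc_sub graph
        (PySem.List.sorted (PySem.Dict.getD (PySem.Dict.ofList graph) x []) (fun t => t) false) v
        (fun t ht => pv_adj_subset_AV graph x t ((PySem.List.mem_sorted _ _ _ _).1 ht))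
      have hm : 4 * pvU graph (disc v (PySem.List.sorted
            (PySem.Dict.getD (PySem.Dict.ofList graph) x []) (fun t => t) false)).1
          + 2 * ls.length
          + 3 * (nxt ++ (disc v (PySem.List.sorted
              (PySem.Dict.getD (PySem.Dict.ofList graph) x []) (fun t => t) false)).2).length ≤ N := by
        simp only [List.length_cons, List.length_append] at h ⊢
        omega
      have hih := ih ls
        (nxt ++ (disc v (PySem.List.sorted
            (PySem.Dict.getD (PySem.Dict.ofList graph) x []) (fun t => t) false)).2)
        (disc v (PySem.List.sorted
            (PySem.Dict.getD (PySem.Dict.ofList graph) x []) (fun t => t) false)).1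
        (order ++ ((disc v (PySem.List.sorted
            (PySem.Dict.getD (PySem.Dict.ofList graph) x []) (fun t => t) false)).2).map
              (fun n => (n, d + 1)))
        d hm
      simp only [List.map_cons, List.cons_append]
      rw [aLoop]
      rw [foldA_char]
      simp only [List.foldl_cons, bNode]
      rw [foldB_char]
      rw [List.append_assoc, ← List.map_append] at *
      exact hih

-- ===== VERDICT (by name: the statement is the Claim_ definition above) =====
theorem BFS_spec : Claim_equal_BFS := by
  intro s g _ _
  unfold Spec_BFS BFS BFS_alt
  have h0 : PySem.Set.ofList [s] = [s] := PySem.Set.ofList_eq_self_of_nodup [s] (List.nodup_singleton s)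
  have hmain := pv_main g (4 * pvU g [s] + 2) [s] [] [s] [(s, 0)] 0 (by simp)
  simp only [List.map_cons, List.map_nil, List.append_nil] at hmain
  have h1 : pvWsum [(s, 0)] = 0 := by simp [pvWsum, PySem.List.enumerate]
  have h2 : (([(s, 0)] : List (Int × Int)).length : Int) = 1 := by simp
  rw [h1, h2] at hmain
  rw [h0, hmain]
  conv_rhs => rw [bLevel]
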